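-- pv_equiv track=rewrite | github.com/wherby/code | contest/00000c397d130/c421/q4/t4.py | mutliply
-- ===== SOURCE A (Python) =====
-- mod = 10**9+7
--
-- def mutliply(m1,m2):
--     n = len(m1)
--     ret = [[0]*n for _ in range(n)]
--     for i in range(n):
--         for j in range(n):
--             t =0
--             for k in range(n):
--                 t += m1[i][k]*m2[k][j]
--             ret[i][j] = t %mod
--     return ret
-- ===== SOURCE B (Python) =====
-- mod = 10**9+7
--
-- def mutliply(m1, m2):
--     # row-linear-combination ("ikj") scheme: each output row is built as a
--     # running vector accumulation of scaled rows of m2; one final mod pass per row.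
--     n = len(m1)
--     ret = []
--     for row in m1:
--         acc = [0] * n
--         for k in range(n):
--             a = row[k]
--             brow = m2[k]
--             acc = [x + a * y for x, y in zip(acc, brow)]
--         ret.append([x % mod for x in acc])
--     return ret
-- ===== Notes on version B (the rewrite author's own statement) =====
-- stated objective: alternative
-- what changed: Replaces the index-driven i/j/k triple loop with a row-linear-combination scheme: each output row is accumulated as a running vector sum of m1[i][k]-scaled rows of m2 (zip-based vector ops, no index arithmetic), with one mod pass per finished row.
import Mathlib
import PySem

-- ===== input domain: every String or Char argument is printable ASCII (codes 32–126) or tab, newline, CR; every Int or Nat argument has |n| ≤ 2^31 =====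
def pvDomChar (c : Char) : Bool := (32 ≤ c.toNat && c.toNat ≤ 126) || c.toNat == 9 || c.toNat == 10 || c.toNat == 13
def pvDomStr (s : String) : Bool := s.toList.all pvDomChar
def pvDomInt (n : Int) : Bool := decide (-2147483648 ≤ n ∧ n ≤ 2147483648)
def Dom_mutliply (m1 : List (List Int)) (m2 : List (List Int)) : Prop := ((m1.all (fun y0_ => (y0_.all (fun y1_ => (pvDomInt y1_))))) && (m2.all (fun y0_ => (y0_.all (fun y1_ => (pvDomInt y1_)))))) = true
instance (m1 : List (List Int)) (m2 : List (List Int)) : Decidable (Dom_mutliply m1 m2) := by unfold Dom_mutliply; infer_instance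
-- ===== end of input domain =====

-- B rebuilds each output row as a running vector sum of scaled rows of m2 (zip-based,
-- no index arithmetic) instead of A's i/j/k index triple loop; objective: alternative.

-- ===== PORT A =====
def mutliply (m1 : List (List Int)) (m2 : List (List Int)) : List (List Int) :=
  let n : Int := (m1.length : Int)
  (PySem.List.pyRange 0 n 1).map (fun i =>
    (PySem.List.pyRange 0 n 1).map (fun j =>
      PySem.Int.mod
        ((PySem.List.pyRange 0 n 1).foldl
          (fun t k =>
            t + PySem.List.pyGetD (PySem.List.pyGetD m1 i []) k 0 *
                PySem.List.pyGetD (PySem.List.pyGetD m2 k []) j 0) 0)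
        1000000007))

-- ===== PORT B =====
def mutliply_alt (m1 : List (List Int)) (m2 : List (List Int)) : List (List Int) :=
  let n := m1.length
  m1.map (fun row =>
    (((PySem.List.pyRange 0 (n : Int) 1).foldl
        (fun acc k =>
          let a := PySem.List.pyGetD row k 0
          let brow := PySem.List.pyGetD m2 k []
          (acc.zip brow).map (fun xy => xy.1 + a * xy.2))
        (List.replicate n 0)).map (fun x => PySem.Int.mod x 1000000007)))

-- ===== PRECONDITION & SPEC =====
-- Pre_ excludes exactly the inputs on which A raises IndexError: some row of m1 shorter
-- than len(m1), fewer than len(m1) rows in m2, or one of the first len(m1) rows of m2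
-- shorter than len(m1).
def Pre_mutliply (m1 : List (List Int)) (m2 : List (List Int)) : Prop :=
  (∀ row ∈ m1, m1.length ≤ row.length) ∧ m1.length ≤ m2.length ∧
  (∀ row ∈ m2.take m1.length, m1.length ≤ row.length)
instance (m1 : List (List Int)) (m2 : List (List Int)) : Decidable (Pre_mutliply m1 m2) := by
  unfold Pre_mutliply; infer_instance
def pvWitness_mutliply : List (List Int) × List (List Int) :=
  ([[1, 2], [3, 4]], [[5, 6], [7, 8]])
def Spec_mutliply (m1 : List (List Int)) (m2 : List (List Int)) (out : List (List Int)) : Prop := out = mutliply_alt m1 m2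
instance (m1 : List (List Int)) (m2 : List (List Int)) (out : List (List Int)) : Decidable (Spec_mutliply m1 m2 out) := by unfold Spec_mutliply; infer_instance

-- ===== CLAIM (what is proved, stated in full; the proofs are below) =====
def Claim_equal_mutliply : Prop := ∀ (m1 : List (List Int)) (m2 : List (List Int)), Dom_mutliply m1 m2 → Pre_mutliply m1 m2 → Spec_mutliply m1 m2 (mutliply m1 m2)

-- ===== LEMMAS AND PROOFS =====

-- common reference value: entry (i,j) before the mod
def pvEntry (m1 m2 : List (List Int)) (n i j : Nat) : Int :=
  ((List.range n).map
    (fun k => (m1.getD i []).getD k 0 * ((m2.getD k []).getD j 0))).sum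

theorem pv_foldl_add_sum {α : Type} (l : List α) (f : α → Int) (init : Int) :
    l.foldl (fun t k => t + f k) init = init + (l.map f).sum := by
  induction l generalizing init with
  | nil => simp
  | cons a l ih => simp [List.foldl_cons, ih, add_assoc]

theorem pv_A_eq (m1 m2 : List (List Int)) :
    mutliply m1 m2 =
      (List.range m1.length).map (fun i =>
        (List.range m1.length).map (fun j =>
          PySem.Int.mod (pvEntry m1 m2 m1.length i j) 1000000007)) := by
  simp only [mutliply, PySem.List.pyRange_one, pvEntry, List.map_map, Function.comp_def,
    zero_add, Int.sub_zero, Int.toNat_natCast, PySem.List.pyGetD_natCast,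
    pv_foldl_add_sum]

theorem pv_map_eq_range_map {α β : Type} (l : List α) (f : α → β) (d : α) :
    l.map f = (List.range l.length).map (fun i => f (l.getD i d)) := by
  apply List.ext_getElem
  · simp
  · intro i h1 h2
    simp only [List.getElem_map, List.getElem_range]
    rw [List.getD_eq_getElem _ _ (by simpa using h2)]

-- loop invariant for B's inner fold
theorem pv_foldB (ps : List (Int × List Int)) (init : List Int)
    (h : ∀ p ∈ ps, init.length ≤ p.2.length) :
    ps.foldl (fun acc ab => (acc.zip ab.2).map (fun xy => xy.1 + ab.1 * xy.2)) init =
      (List.range init.length).map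
        (fun j => init.getD j 0 + (ps.map (fun ab => ab.1 * ab.2.getD j 0)).sum) := by
  induction ps generalizing init with
  | nil =>
    simp only [List.foldl_nil, List.map_nil, List.sum_nil, add_zero]
    apply List.ext_getElem
    · simp
    · intro i h1 h2
      simp only [List.getElem_map, List.getElem_range]
      rw [List.getD_eq_getElem _ _ (by simpa using h1)]
  | cons p ps ih =>
    have hp : init.length ≤ p.2.length := h p (by simp)
    have hlen : ((init.zip p.2).map
        (fun xy : Int × Int => xy.1 + p.1 * xy.2)).length = init.length := by
      simp [List.length_zip]; omega
    rw [List.foldl_cons, ih _ (by intro q hq; rw [hlen]; exact h q (List.mem_cons_of_mem _ hq))]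
    rw [hlen]
    apply List.ext_getElem
    · simp
    · intro j hj _
      have hj' : j < init.length := by simpa using hj
      have hj2 : j < p.2.length := lt_of_lt_of_le hj' hp
      simp only [List.getElem_map, List.getElem_range, List.map_cons, List.sum_cons]
      rw [List.getD_eq_getElem _ _ (by simp [List.length_zip]; omega),
        List.getD_eq_getElem _ _ hj', List.getD_eq_getElem _ _ hj2]
      simp only [List.getElem_map, List.getElem_zip]
      ring

theorem pv_B_eq (m1 m2 : List (List Int)) (hpre : Pre_mutliply m1 m2) :
    mutliply_alt m1 m2 =
      (List.range m1.length).map (fun i =>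
        (List.range m1.length).map (fun j =>
          PySem.Int.mod (pvEntry m1 m2 m1.length i j) 1000000007)) := by
  obtain ⟨h1, h2, h3⟩ := hpre
  rw [mutliply_alt]
  rw [pv_map_eq_range_map m1 _ []]
  apply List.ext_getElem
  · simp
  · intro i hi _
    simp only [List.getElem_map, List.getElem_range, PySem.List.pyRange_one,
      Int.sub_zero, Int.toNat_natCast, zero_add]
    rw [List.foldl_map]
    simp only [PySem.List.pyGetD_natCast]
    have hi' : i < m1.length := by simpa using hi
    set row := m1.getD i [] with hrow
    have hrowmem : row ∈ m1 := by
      rw [hrow, List.getD_eq_getElem?_getD, List.getElem?_eq_getElem hi']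
      exact List.getElem_mem _
    have hrowlen : m1.length ≤ row.length := h1 _ hrowmem
    have hzip : (List.range m1.length).map
        (fun k => (row.getD k 0, m2.getD k [])) =
        (row.take m1.length).zip (m2.take m1.length) := by
      apply List.ext_getElem
      · simp [List.length_zip]; omega
      · intro k hk _
        have hk1 : k < m1.length := by simpa using hk
        have hk2 : k < m2.length := lt_of_lt_of_le hk1 h2
        have hkr : k < row.length := lt_of_lt_of_le hk1 hrowlen
        simp only [List.getElem_map, List.getElem_range, List.getElem_zip,
          List.getElem_take]
        rw [List.getD_eq_getElem _ _ hkr, List.getD_eq_getElem _ _ hk2]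
    have hfold : (List.range m1.length).foldl
        (fun acc k => ((acc.zip (m2.getD k [])).map
          (fun xy : Int × Int => xy.1 + row.getD k 0 * xy.2)))
        (List.replicate m1.length 0) =
        ((row.take m1.length).zip (m2.take m1.length)).foldl
          (fun acc ab => (acc.zip ab.2).map (fun xy => xy.1 + ab.1 * xy.2))
          (List.replicate m1.length 0) := by
      rw [← hzip, List.foldl_map]
    rw [hfold]
    have hzlen2 : ∀ p ∈ (row.take m1.length).zip (m2.take m1.length),
        (List.replicate m1.length (0 : Int)).length ≤ p.2.length := by
      intro p hp
      simp only [List.length_replicate]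
      exact h3 _ (List.of_mem_zip hp).2
    rw [pv_foldB _ _ hzlen2]
    simp only [List.length_replicate, List.map_map, Function.comp_def]
    apply List.map_congr_left
    intro j hj
    have hj' : j < m1.length := by simpa using hj
    congr 1
    rw [List.getD_eq_getElem _ _ (by simpa using hj'), List.getElem_replicate, zero_add,
      pvEntry]
    congr 1
    rw [← hzip]
    simp only [List.map_map, Function.comp_def]
    rw [← hrow]

-- ===== VERDICT (by name: the statement is the Claim_ definition above) =====
theorem mutliply_spec : Claim_equal_mutliply := by
  intro m1 m2 _ hpre
  unfold Spec_mutliply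
  rw [pv_A_eq, pv_B_eq m1 m2 hpre]
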